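-- pv_equiv track=rewrite | github.com/ucgmsim/slurm_gm_workflow | shared_workflow/shared.py | check_seismo_files
-- ===== SOURCE A (Python) =====
-- def check_seismo_files(list_of_stations, list_of_files):
--     """check if all station in list has .000 .090 .ver files
--     """
--     for station in list_of_stations:
--         if station + ".000" not in list_of_files:
--             return False
--         if station + ".090" not in list_of_files:
--             return False
--         if station + ".ver" not in list_of_files:
--             return False
--     return True
-- ===== SOURCE B (Python) =====
-- def check_seismo_files(list_of_stations, list_of_files):
--     """check if all station in list has .000 .090 .ver files
--
--     Inverted traversal: scan the FILE list once, parse each filename into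
--     stem + recognised extension, and accumulate a per-stem bitmask of which
--     variants were seen; then every station must map to the full mask 7.
--     """
--     masks = {}
--     for f in list_of_files:
--         for bit, ext in ((1, ".000"), (2, ".090"), (4, ".ver")):
--             if f.endswith(ext):
--                 stem = f[:-4]
--                 masks[stem] = masks.get(stem, 0) | bit
--     return all(masks.get(station, 0) == 7 for station in list_of_stations)
-- ===== Notes on version B (the rewrite author's own statement) =====
-- stated objective: alternative
-- what changed: Inverts the traversal: instead of looping over stations and scanning the file list for each of three names, B makes one pass over the files, parsing each filename into stem+extension and accumulating a per-stem bitmask of seen variants in a dict, then checks every station's mask equals 7.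
import Mathlib
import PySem

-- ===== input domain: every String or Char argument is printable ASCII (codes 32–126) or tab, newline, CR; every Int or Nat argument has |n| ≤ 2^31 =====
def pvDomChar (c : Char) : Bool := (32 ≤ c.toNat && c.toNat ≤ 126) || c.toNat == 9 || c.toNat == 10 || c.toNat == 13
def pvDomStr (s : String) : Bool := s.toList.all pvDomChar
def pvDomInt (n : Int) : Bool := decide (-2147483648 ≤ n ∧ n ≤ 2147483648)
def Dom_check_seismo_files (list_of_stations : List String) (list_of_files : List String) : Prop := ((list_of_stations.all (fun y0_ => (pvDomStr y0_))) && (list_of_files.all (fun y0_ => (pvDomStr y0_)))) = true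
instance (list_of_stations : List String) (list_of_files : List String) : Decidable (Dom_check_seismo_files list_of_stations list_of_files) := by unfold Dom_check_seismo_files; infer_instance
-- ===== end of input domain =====

-- B inverts the traversal: one pass over the files parsing each name into stem+extension and
-- accumulating a per-stem bitmask of seen variants, then each station's mask must be 7 (alternative).

-- ===== PORT A =====
-- Port of A: loop over stations, returning False at the first missing variant.
def check_seismo_files (list_of_stations : List String) (list_of_files : List String) : Bool :=
  match list_of_stations with
  | [] => true
  | station :: rest =>
    if !(list_of_files.contains (station ++ ".000")) then false
    else if !(list_of_files.contains (station ++ ".090")) then false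
    else if !(list_of_files.contains (station ++ ".ver")) then false
    else check_seismo_files rest list_of_files

-- ===== PORT B =====
-- Port of B: fold over the files building a dict stem ↦ bitmask of seen variants, then check masks.
def csfStep (d : PySem.Dict String Int) (f : String) : PySem.Dict String Int :=
  ([(1, ".000"), (2, ".090"), (4, ".ver")] : List (Int × String)).foldl
    (fun d p =>
      if PySem.Str.endswith f p.2 then
        let stem := PySem.Str.slice f none (some (-4))   -- f[:-4]
        d.insert stem (PySem.Int.bor (d.getD stem 0) p.1)
      else d) d

def check_seismo_files_alt (list_of_stations : List String) (list_of_files : List String) : Bool :=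
  let masks := list_of_files.foldl csfStep PySem.Dict.empty
  list_of_stations.all (fun station => masks.getD station 0 == 7)

-- ===== PRECONDITION & SPEC =====
def Spec_check_seismo_files (list_of_stations : List String) (list_of_files : List String) (out : Bool) : Prop := out = check_seismo_files_alt list_of_stations list_of_files
instance (list_of_stations : List String) (list_of_files : List String) (out : Bool) : Decidable (Spec_check_seismo_files list_of_stations list_of_files out) := by unfold Spec_check_seismo_files; infer_instance

-- ===== CLAIM (what is proved, stated in full; the proofs are below) =====
def Claim_equal_check_seismo_files : Prop := ∀ (list_of_stations : List String) (list_of_files : List String), Dom_check_seismo_files list_of_stations list_of_files → Spec_check_seismo_files list_of_stations list_of_files (check_seismo_files list_of_stations list_of_files)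

-- ===== LEMMAS AND PROOFS =====

-- the bitmask value as a function of which of the three variants have been seen
def csfMval (a b c : Bool) : Int :=
  (if a then 1 else 0) + (if b then 2 else 0) + (if c then 4 else 0)

theorem csfMval_or1 (a b c : Bool) :
    PySem.Int.bor (csfMval a b c) 1 = csfMval true b c := by
  cases a <;> cases b <;> cases c <;> decide

theorem csfMval_or2 (a b c : Bool) :
    PySem.Int.bor (csfMval a b c) 2 = csfMval a true c := by
  cases a <;> cases b <;> cases c <;> decide

theorem csfMval_or4 (a b c : Bool) :
    PySem.Int.bor (csfMval a b c) 4 = csfMval a b true := by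
  cases a <;> cases b <;> cases c <;> decide

theorem csfMval_eq_seven (a b c : Bool) :
    (csfMval a b c == 7) = (a && b && c) := by
  cases a <;> cases b <;> cases c <;> decide

-- two same-length suffixes of a list are equal
theorem suffix_eq_of_length (l1 l2 f : List Char) (h1 : l1 <:+ f) (h2 : l2 <:+ f)
    (h : l1.length = l2.length) : l1 = l2 := by
  obtain ⟨p1, hp1⟩ := h1
  obtain ⟨p2, hp2⟩ := h2
  have hf := hp1.trans hp2.symm
  have hlen : p1.length = p2.length := by
    have e1 := congrArg List.length hp1
    have e2 := congrArg List.length hp2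
    rw [List.length_append] at e1 e2
    omega
  exact (List.append_inj hf hlen).2

-- a station name concatenated with an extension, as char lists
theorem append_toList (s e : String) : (s ++ e).toList = s.toList ++ e.toList := by
  simp

-- if f ends with the 4-char extension e, then s ++ e = f ↔ s = f[:-4]
theorem stem_spec (f e : String) (hlen : e.toList.length = 4)
    (h : PySem.Str.endswith f e = true) :
    ∀ s : String, (s ++ e = f) ↔ s = PySem.Str.slice f none (some (-4)) := by
  rw [PySem.Str.endswith_eq, PySem.Chars.endswith_iff] at h
  obtain ⟨p, hp⟩ := h
  have hflen : f.toList.length = p.length + 4 := by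
    have := congrArg List.length hp
    rw [List.length_append] at this
    omega
  have hstem : (PySem.Str.slice f none (some (-4))).toList = p := by
    rw [PySem.Str.toList_slice, PySem.Chars.slice_eq_listSlice]
    have h4 : ((-4 : Int)) = -((4 : Nat) : Int) := by norm_num
    rw [h4, PySem.List.slice_to_neg_natCast _ _ (by norm_num)]
    have hn : f.toList.length - 4 = p.length := by omega
    rw [hn, ← hp, List.take_left]
  intro s
  constructor
  · intro hs
    apply String.toList_inj.mp
    rw [hstem]
    have heq : s.toList ++ e.toList = p ++ e.toList := by
      rw [← append_toList, hs, ← hp]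
    have hl : s.toList.length = p.length := by
      have := congrArg List.length heq
      rw [List.length_append, List.length_append] at this
      omega
    exact (List.append_inj heq hl).1
  · intro hs
    subst hs
    apply String.toList_inj.mp
    rw [append_toList, hstem, hp]

-- if f does not end with e, no s has s ++ e = f
theorem not_endswith_ne (f e : String) (h : PySem.Str.endswith f e = false) :
    ∀ s : String, s ++ e ≠ f := by
  intro s hs
  rw [PySem.Str.endswith_eq] at h
  have : PySem.Chars.endswith f.toList e.toList = true := by
    rw [PySem.Chars.endswith_iff, ← hs, append_toList]
    exact ⟨s.toList, rfl⟩
  simp [this] at h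

-- a file ends with at most one of the three extensions
theorem endswith_unique (f e1 e2 : String) (hne : e1.toList ≠ e2.toList)
    (hl : e1.toList.length = e2.toList.length)
    (h1 : PySem.Str.endswith f e1 = true) : PySem.Str.endswith f e2 = false := by
  by_contra h
  rw [Bool.not_eq_false, PySem.Str.endswith_eq, PySem.Chars.endswith_iff] at h
  rw [PySem.Str.endswith_eq, PySem.Chars.endswith_iff] at h1
  exact hne (suffix_eq_of_length _ _ _ h1 h hl)

-- one step of B's fold updates the invariant by the single file processed
theorem csfStep_getD (d : PySem.Dict String Int) (f : String)
    (a b c : String → Bool)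
    (hd : ∀ s, d.getD s 0 = csfMval (a s) (b s) (c s)) :
    ∀ s, (csfStep d f).getD s 0 =
      csfMval (a s || decide (s ++ ".000" = f)) (b s || decide (s ++ ".090" = f))
        (c s || decide (s ++ ".ver" = f)) := by
  intro s
  unfold csfStep
  by_cases h0 : PySem.Str.endswith f ".000" = true
  · have h9 : PySem.Str.endswith f ".090" = false :=
      endswith_unique f ".000" ".090" (by decide) (by decide) h0
    have hv : PySem.Str.endswith f ".ver" = false :=
      endswith_unique f ".000" ".ver" (by decide) (by decide) h0
    have hst := stem_spec f ".000" (by decide) h0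
    have e9 : decide (s ++ ".090" = f) = false := by
      simp [not_endswith_ne f ".090" h9 s]
    have ev : decide (s ++ ".ver" = f) = false := by
      simp [not_endswith_ne f ".ver" hv s]
    simp only [List.foldl, h0, h9, hv, if_true, if_false, Bool.false_eq_true]
    rw [PySem.Dict.getD_insert, e9, ev]
    by_cases hs : s = PySem.Str.slice f none (some (-4))
    · have e0 : decide (s ++ ".000" = f) = true := by
        simp [(hst s).mpr hs]
      rw [if_pos hs, hs, hd, csfMval_or1, ← hs, e0]
      simp
    · have e0 : decide (s ++ ".000" = f) = false := by
        simp only [decide_eq_false_iff_not]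
        intro hc; exact hs ((hst s).mp hc)
      rw [if_neg hs, hd, e0]
      simp
  · rw [Bool.not_eq_true] at h0
    have e0 : decide (s ++ ".000" = f) = false := by
      simp [not_endswith_ne f ".000" h0 s]
    by_cases h9 : PySem.Str.endswith f ".090" = true
    · have hv : PySem.Str.endswith f ".ver" = false :=
        endswith_unique f ".090" ".ver" (by decide) (by decide) h9
      have hst := stem_spec f ".090" (by decide) h9
      have ev : decide (s ++ ".ver" = f) = false := by
        simp [not_endswith_ne f ".ver" hv s]
      simp only [List.foldl, h0, h9, hv, if_true, if_false, Bool.false_eq_true]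
      rw [PySem.Dict.getD_insert, e0, ev]
      by_cases hs : s = PySem.Str.slice f none (some (-4))
      · have e9 : decide (s ++ ".090" = f) = true := by simp [(hst s).mpr hs]
        rw [if_pos hs, hs, hd, csfMval_or2, ← hs, e9]
        simp
      · have e9 : decide (s ++ ".090" = f) = false := by
          simp only [decide_eq_false_iff_not]
          intro hc; exact hs ((hst s).mp hc)
        rw [if_neg hs, hd, e9]
        simp
    · rw [Bool.not_eq_true] at h9
      have e9 : decide (s ++ ".090" = f) = false := by
        simp [not_endswith_ne f ".090" h9 s]
      by_cases hv : PySem.Str.endswith f ".ver" = true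
      · have hst := stem_spec f ".ver" (by decide) hv
        simp only [List.foldl, h0, h9, hv, if_true, if_false, Bool.false_eq_true]
        rw [PySem.Dict.getD_insert, e0, e9]
        by_cases hs : s = PySem.Str.slice f none (some (-4))
        · have ev : decide (s ++ ".ver" = f) = true := by simp [(hst s).mpr hs]
          rw [if_pos hs, hs, hd, csfMval_or4, ← hs, ev]
          simp
        · have ev : decide (s ++ ".ver" = f) = false := by
            simp only [decide_eq_false_iff_not]
            intro hc; exact hs ((hst s).mp hc)
          rw [if_neg hs, hd, ev]
          simp
      · rw [Bool.not_eq_true] at hv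
        have ev : decide (s ++ ".ver" = f) = false := by
          simp [not_endswith_ne f ".ver" hv s]
        simp only [List.foldl, h0, h9, hv, if_false, Bool.false_eq_true]
        rw [hd, e0, e9, ev]
        simp

-- folding an 'or' of a head test into membership of the whole list
theorem or_decide_cons (x f : String) (rest : List String) (a : Bool) :
    ((a || decide (x = f)) || decide (x ∈ rest)) = (a || decide (x ∈ f :: rest)) := by
  cases a <;> cases hx : decide (x = f) <;> cases hr : decide (x ∈ rest) <;>
    simp_all [List.mem_cons]

-- the whole fold: the mask of s records exactly which variants occur in the file list
theorem csf_fold_getD (fs : List String) (d : PySem.Dict String Int)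
    (a b c : String → Bool)
    (hd : ∀ s, d.getD s 0 = csfMval (a s) (b s) (c s)) :
    ∀ s, (fs.foldl csfStep d).getD s 0 =
      csfMval (a s || decide ((s ++ ".000") ∈ fs)) (b s || decide ((s ++ ".090") ∈ fs))
        (c s || decide ((s ++ ".ver") ∈ fs)) := by
  induction fs generalizing d a b c with
  | nil => intro s; simp [hd s]
  | cons f rest ih =>
    intro s
    have hrec := ih (csfStep d f)
      (fun s => a s || decide (s ++ ".000" = f)) (fun s => b s || decide (s ++ ".090" = f))
      (fun s => c s || decide (s ++ ".ver" = f)) (csfStep_getD d f a b c hd) s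
    simp only [List.foldl, hrec]
    rw [or_decide_cons, or_decide_cons, or_decide_cons]

theorem a_eq_true_iff (st fs : List String) :
    check_seismo_files st fs = true ↔
      ∀ s ∈ st, (s ++ ".000") ∈ fs ∧ (s ++ ".090") ∈ fs ∧ (s ++ ".ver") ∈ fs := by
  induction st with
  | nil => simp [check_seismo_files]
  | cons s rest ih =>
    simp only [check_seismo_files, List.mem_cons]
    by_cases h0 : (s ++ ".000") ∈ fs <;>
      by_cases h9 : (s ++ ".090") ∈ fs <;>
        by_cases hv : (s ++ ".ver") ∈ fs <;>
          simp [h0, h9, hv, ih]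

theorem b_eq_true_iff (st fs : List String) :
    check_seismo_files_alt st fs = true ↔
      ∀ s ∈ st, (s ++ ".000") ∈ fs ∧ (s ++ ".090") ∈ fs ∧ (s ++ ".ver") ∈ fs := by
  unfold check_seismo_files_alt
  have hmask := csf_fold_getD fs PySem.Dict.empty (fun _ => false) (fun _ => false)
    (fun _ => false) (by intro s; rfl)
  simp only [List.all_eq_true]
  constructor
  · intro h s hs
    have hm := h s hs
    rw [hmask s] at hm
    simp only [Bool.false_or, csfMval_eq_seven, Bool.and_eq_true, decide_eq_true_eq] at hm
    exact ⟨hm.1.1, hm.1.2, hm.2⟩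
  · intro h s hs
    rw [hmask s]
    simp only [Bool.false_or, csfMval_eq_seven]
    obtain ⟨h0, h9, hv⟩ := h s hs
    simp [h0, h9, hv]

-- ===== VERDICT (by name: the statement is the Claim_ definition above) =====
theorem check_seismo_files_spec : Claim_equal_check_seismo_files := by
  intro st fs _
  unfold Spec_check_seismo_files
  rw [Bool.eq_iff_iff, a_eq_true_iff, b_eq_true_iff]
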